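-- pv_equiv track=rewrite | github.com/raeez/chiral-bar-cobar | compute/lib/bar_cohomology_w4_explicit_engine.py | vbar_basis_labels
-- ===== SOURCE A (Python) =====
-- from typing import Any, Dict, List, Optional, Tuple
--
-- def _partitions_geq(n: int, min_part: int) -> List[Tuple[int, ...]]:
--     """Partitions of n into parts >= min_part (descending order)."""
--     if n == 0:
--         return [()]
--     if n < min_part:
--         return []
--     result = []
--
--     def backtrack(remaining, max_part, current):
--         if remaining == 0:
--             result.append(tuple(current))
--             return
--         for p in range(min(remaining, max_part), min_part - 1, -1):
--             current.append(p)
--             backtrack(remaining - p, p, current)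
--             current.pop()
--
--     backtrack(n, n, [])
--     return result
--
-- State = Tuple[Tuple[int, ...], Tuple[int, ...], Tuple[int, ...]]
--
-- def vbar_basis(max_weight: int) -> Dict[int, List[State]]:
--     """PBW basis for V-bar at each weight up to max_weight.
--
--     States: L_{-l1}...L_{-lk} W3_{-m1}...W3_{-ml} W4_{-p1}...W4_{-pr} |0>
--     with l_i >= 2 (desc), m_j >= 3 (desc), p_k >= 4 (desc).
--     """
--     basis: Dict[int, List[State]] = {}
--     for h in range(2, max_weight + 1):
--         states: List[State] = []
--         for a in range(0, h + 1):
--             for b in range(0, h - a + 1):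
--                 c_part = h - a - b
--                 for lp in _partitions_geq(a, 2):
--                     for wp in _partitions_geq(b, 3):
--                         for w4p in _partitions_geq(c_part, 4):
--                             states.append((lp, wp, w4p))
--         basis[h] = states
--     return basis
--
-- def vbar_basis_labels(max_weight: int) -> Dict[int, List[str]]:
--     """Human-readable labels for V-bar basis states."""
--     basis = vbar_basis(max_weight)
--     labels: Dict[int, List[str]] = {}
--     for h, states in basis.items():
--         lab = []
--         for (lm, wm, w4m) in states:
--             parts = []
--             for n in lm:
--                 parts.append(f"L_{{{-n}}}")
--             for m in wm:
--                 parts.append(f"W3_{{{-m}}}")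
--             for p in w4m:
--                 parts.append(f"W4_{{{-p}}}")
--             if not parts:
--                 lab.append("|0>")
--             else:
--                 lab.append("".join(parts) + "|0>")
--         labels[h] = lab
--     return labels
-- ===== SOURCE B (Python) =====
-- def _parts(n, lo, hi):
--     """Partitions of n into parts lo <= p <= hi, largest-first, descending DFS order."""
--     if n == 0:
--         return [()]
--     return [(p,) + rest
--             for p in range(min(n, hi), lo - 1, -1)
--             for rest in _parts(n - p, lo, p)]
--
-- def _run(pre, xs):
--     return "".join(pre + str(-x) + "}" for x in xs)
--
-- def vbar_basis_labels(max_weight):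
--     return {h: [_run("L_{", lp) + _run("W3_{", wp) + _run("W4_{", w4p) + "|0>"
--                 for a in range(h + 1)
--                 for b in range(h - a + 1)
--                 for lp in _parts(a, 2, a)
--                 for wp in _parts(b, 3, b)
--                 for w4p in _parts(h - a - b, 4, h - a - b)]
--             for h in range(2, max_weight + 1)}
-- ===== Notes on version B (the rewrite author's own statement) =====
-- stated objective: simpler
-- what changed: Replaces the mutable backtracking partition generator (inner function mutating current/result) and the two-pass pipeline (build dict of state tuples, then render) with an accumulator-free recursive comprehension that yields the same descending partition order and renders each label string directly in a single dict comprehension.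
import Mathlib
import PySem

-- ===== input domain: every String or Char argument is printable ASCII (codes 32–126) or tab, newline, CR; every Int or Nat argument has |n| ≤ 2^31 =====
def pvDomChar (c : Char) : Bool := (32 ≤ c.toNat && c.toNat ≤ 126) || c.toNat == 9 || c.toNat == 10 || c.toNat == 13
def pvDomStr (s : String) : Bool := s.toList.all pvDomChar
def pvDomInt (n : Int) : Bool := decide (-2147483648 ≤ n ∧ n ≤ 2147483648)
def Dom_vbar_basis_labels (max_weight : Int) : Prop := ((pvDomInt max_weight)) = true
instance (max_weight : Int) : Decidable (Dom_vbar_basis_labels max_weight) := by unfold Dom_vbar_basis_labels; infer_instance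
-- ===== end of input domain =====

-- B replaces A's mutable backtracking partition generator and its two-pass
-- dict-of-states-then-render pipeline by a direct comprehension that builds the
-- label strings in one pass (objective: simpler; same enumeration order).

-- ===== PORT A =====
-- 'backtrack' inner function of _partitions_geq; the mutable 'current'/'result'
-- lists become explicit arguments.  Python's recursion is not structural, so we
-- use fuel; every recursive call decreases 'remaining' by p ≥ min_part ≥ 2 at
-- every call site A makes (min_part ∈ {2,3,4}, 0 ≤ n), so fuel n.toNat+1 is
-- never exhausted on A's actual calls and the port is exact there.
def btA : Nat → Int → Int → Int → List Int → List (List Int) → List (List Int)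
  | 0, _, _, _, _, result => result
  | fuel+1, minp, remaining, maxp, current, result =>
    if remaining = 0 then result ++ [current]
    else (PySem.List.pyRange (min remaining maxp) (minp - 1) (-1)).foldl
      (fun res p => btA fuel minp (remaining - p) p (current ++ [p]) res) result

def pgeqA (n minp : Int) : List (List Int) :=
  if n = 0 then [[]]
  else if n < minp then []
  else btA (n.toNat + 1) minp n n [] []

-- body of the per-state label loop of vbar_basis_labels (f-strings become ++)
def labelA (st : List Int × List Int × List Int) : String :=
  let parts := st.1.foldl (fun ps n => ps ++ ["L_{" ++ PySem.Int.toStr (-n) ++ "}"]) ([] : List String)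
  let parts := st.2.1.foldl (fun ps m => ps ++ ["W3_{" ++ PySem.Int.toStr (-m) ++ "}"]) parts
  let parts := st.2.2.foldl (fun ps p => ps ++ ["W4_{" ++ PySem.Int.toStr (-p) ++ "}"]) parts
  if parts = [] then "|0>" else PySem.Str.join "" parts ++ "|0>"

-- vbar_basis: the dict keys h are the distinct, increasing values of range(2, mw+1),
-- so each basis[h] = states is a fresh-key insertion = append to the association list.
def vbar_basisA (mw : Int) : List (Int × List (List Int × List Int × List Int)) :=
  (PySem.List.pyRange 2 (mw + 1) 1).foldl (fun basis h =>
    let states := (PySem.List.pyRange 0 (h + 1) 1).foldl (fun states a =>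
      (PySem.List.pyRange 0 (h - a + 1) 1).foldl (fun states b =>
        let c_part := h - a - b
        (pgeqA a 2).foldl (fun states lp =>
          (pgeqA b 3).foldl (fun states wp =>
            (pgeqA c_part 4).foldl (fun states w4p =>
              states ++ [(lp, wp, w4p)]) states) states) states) states) []
    basis ++ [(h, states)]) []

def vbar_basis_labels (max_weight : Int) : List (Int × List String) :=
  (vbar_basisA max_weight).foldl (fun labels hs =>
    labels ++ [(hs.1, hs.2.foldl (fun lab st => lab ++ [labelA st]) [])]) []

-- ===== PORT B =====
-- _parts: accumulator-free recursion (list comprehension = flatMap/map); fuel as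
-- above, exact on every call B makes (lo ∈ {2,3,4}, 0 ≤ n).
def partsB : Nat → Int → Int → Int → List (List Int)
  | 0, _, _, _ => []
  | fuel+1, n, lo, hi =>
    if n = 0 then [[]]
    else (PySem.List.pyRange (min n hi) (lo - 1) (-1)).flatMap
      (fun p => (partsB fuel (n - p) lo p).map (fun rest => p :: rest))

def runB (pre : String) (xs : List Int) : String :=
  PySem.Str.join "" (xs.map (fun x => pre ++ PySem.Int.toStr (-x) ++ "}"))

def vbar_basis_labels_alt (max_weight : Int) : List (Int × List String) :=
  (PySem.List.pyRange 2 (max_weight + 1) 1).map (fun h =>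
    (h, (PySem.List.pyRange 0 (h + 1) 1).flatMap (fun a =>
      (PySem.List.pyRange 0 (h - a + 1) 1).flatMap (fun b =>
        (partsB (a.toNat + 1) a 2 a).flatMap (fun lp =>
          (partsB (b.toNat + 1) b 3 b).flatMap (fun wp =>
            (partsB ((h - a - b).toNat + 1) (h - a - b) 4 (h - a - b)).map (fun w4p =>
              runB "L_{" lp ++ runB "W3_{" wp ++ runB "W4_{" w4p ++ "|0>")))))))

-- ===== PRECONDITION & SPEC =====
def Spec_vbar_basis_labels (max_weight : Int) (out : List (Int × List String)) : Prop := out = vbar_basis_labels_alt max_weight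
instance (max_weight : Int) (out : List (Int × List String)) : Decidable (Spec_vbar_basis_labels max_weight out) := by unfold Spec_vbar_basis_labels; infer_instance

-- ===== CLAIM (what is proved, stated in full; the proofs are below) =====
def Claim_equal_vbar_basis_labels : Prop := ∀ (max_weight : Int), Dom_vbar_basis_labels max_weight → Spec_vbar_basis_labels max_weight (vbar_basis_labels max_weight)

-- ===== LEMMAS AND PROOFS =====

lemma flatten_intersperse_nil (l : List (List Char)) :
    (List.intersperse ([] : List Char) l).flatten = l.flatten := by
  induction l with
  | nil => rfl
  | cons a t ih => cases t <;> simp_all [List.intersperse]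

lemma join_nil_append (l1 l2 : List String) :
    PySem.Str.join "" (l1 ++ l2) = PySem.Str.join "" l1 ++ PySem.Str.join "" l2 := by
  simp [PySem.Str.join, PySem.Chars.join, List.intercalate, flatten_intersperse_nil,
    String.ofList_append]

lemma labelA_eq (lp wp w4p : List Int) :
    labelA (lp, wp, w4p) = runB "L_{" lp ++ runB "W3_{" wp ++ runB "W4_{" w4p ++ "|0>" := by
  unfold labelA runB
  simp only [PySem.List.foldl_append_singleton_eq_map, List.nil_append]
  split_ifs with h
  · rcases List.append_eq_nil_iff.1 h with ⟨h12, h3⟩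
    rcases List.append_eq_nil_iff.1 h12 with ⟨h1, h2⟩
    rw [List.map_eq_nil_iff.1 h1, List.map_eq_nil_iff.1 h2, List.map_eq_nil_iff.1 h3]
    decide
  · rw [join_nil_append, join_nil_append]

lemma btA_eq : ∀ (fuel : Nat) (minp remaining maxp : Int) (current : List Int)
    (result : List (List Int)),
    btA fuel minp remaining maxp current result
      = result ++ (partsB fuel remaining minp maxp).map (fun r => current ++ r) := by
  intro fuel
  induction fuel with
  | zero => intro _ _ _ _ _; simp [btA, partsB]
  | succ f ih =>
    intro minp remaining maxp current result
    by_cases h : remaining = 0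
    · simp [btA, partsB, h]
    · rw [btA, partsB]
      simp only [if_neg h]
      generalize PySem.List.pyRange (min remaining maxp) (minp - 1) (-1) = l
      induction l generalizing result with
      | nil => simp
      | cons p t iht =>
        rw [List.foldl_cons, ih, iht]
        simp [List.flatMap_cons, List.map_map, Function.comp_def, List.append_assoc]

lemma pgeqA_eq (n minp : Int) : pgeqA n minp = partsB (n.toNat + 1) n minp n := by
  unfold pgeqA
  split_ifs with h0 hlt
  · simp [h0, partsB]
  · rw [partsB]
    simp only [if_neg h0]
    rw [min_self, PySem.List.pyRange_neg_one_eq_nil (by omega)]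
    simp
  · rw [btA_eq]
    simp

theorem vbar_basis_labels_spec : Claim_equal_vbar_basis_labels := by
  intro mw _
  unfold Spec_vbar_basis_labels vbar_basis_labels vbar_basisA vbar_basis_labels_alt
  simp only [PySem.List.foldl_append_singleton_eq_map, PySem.List.foldl_append_eq_flatMap,
    List.nil_append, List.map_map, pgeqA_eq]
  refine List.map_congr_left (fun h _ => ?_)
  simp only [Function.comp_def, List.map_flatMap, List.map_map, labelA_eq]
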